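-- pv_equiv track=rewrite | github.com/wiktoraleksanderkaczor/RadialTyping | PointsAndOptionManager.py | get_timekey_slots
-- ===== SOURCE A (Python) =====
-- def get_timekey_slots(key_delay=250, FPS=60):
--     time_slot = 1000 // FPS
--     time_counter = 0
--     # This is out of a second in ms, i.e. 1000 slots.
--     slot_count = 0
--     for i in range(1000):
--         if time_counter < key_delay:
--             time_counter += time_slot
--             slot_count += 1
--
--     return slot_count
-- ===== SOURCE B (Python) =====
-- def get_timekey_slots(key_delay=250, FPS=60):
--     time_slot = 1000 // FPS  # FPS=0 still raises ZeroDivisionError, as in the loop version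
--     if time_slot <= 0:
--         # counter never advances towards key_delay: every slot (or none) qualifies
--         return 1000 if key_delay > 0 else 0
--     # number of increments before the counter reaches key_delay: clamped ceiling
--     return min(1000, max(0, -(-key_delay // time_slot)))
-- ===== Notes on version B (the rewrite author's own statement) =====
-- stated objective: simpler
-- what changed: Replaces the fixed 1000-iteration counting loop by a closed-form clamped ceiling division min(1000, max(0, ceil(key_delay/time_slot))), handling the non-advancing time_slot<=0 case directly.
import Mathlib
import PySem

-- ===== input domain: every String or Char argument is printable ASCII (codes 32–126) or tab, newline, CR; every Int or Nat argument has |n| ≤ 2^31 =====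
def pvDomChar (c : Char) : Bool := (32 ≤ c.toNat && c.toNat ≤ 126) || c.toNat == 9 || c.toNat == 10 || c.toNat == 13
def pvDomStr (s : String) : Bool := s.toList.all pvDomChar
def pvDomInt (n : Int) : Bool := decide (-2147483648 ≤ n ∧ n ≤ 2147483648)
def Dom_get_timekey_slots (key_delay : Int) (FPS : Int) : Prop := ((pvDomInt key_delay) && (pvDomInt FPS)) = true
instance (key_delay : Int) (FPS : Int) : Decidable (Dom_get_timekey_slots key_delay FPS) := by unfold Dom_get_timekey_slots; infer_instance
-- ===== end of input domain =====

-- B replaces the fixed 1000-iteration counting loop by a closed-form clamped ceiling division (simpler, no loop).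

-- ===== PORT A =====
def get_timekey_slots (key_delay : Int) (FPS : Int) : Int :=
  let time_slot := PySem.Int.floordiv 1000 FPS
  let s := (PySem.List.pyRange 0 1000 1).foldl
    (fun (st : Int × Int) _ =>
      if st.1 < key_delay then (st.1 + time_slot, st.2 + 1) else st) (0, 0)
  s.2

-- ===== PORT B =====
def get_timekey_slots_alt (key_delay : Int) (FPS : Int) : Int :=
  let time_slot := PySem.Int.floordiv 1000 FPS
  if time_slot ≤ 0 then (if key_delay > 0 then 1000 else 0)
  else min 1000 (max 0 (-(PySem.Int.floordiv (-key_delay) time_slot)))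

-- ===== PRECONDITION & SPEC =====
-- Pre_ excludes only FPS = 0, where Python A raises ZeroDivisionError.
def Pre_get_timekey_slots (key_delay : Int) (FPS : Int) : Prop := FPS ≠ 0
instance (key_delay : Int) (FPS : Int) : Decidable (Pre_get_timekey_slots key_delay FPS) := by unfold Pre_get_timekey_slots; infer_instance
def pvWitness_get_timekey_slots : Int × Int := (250, 60)

def Spec_get_timekey_slots (key_delay : Int) (FPS : Int) (out : Int) : Prop := out = get_timekey_slots_alt key_delay FPS
instance (key_delay : Int) (FPS : Int) (out : Int) : Decidable (Spec_get_timekey_slots key_delay FPS out) := by unfold Spec_get_timekey_slots; infer_instance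

-- ===== CLAIM (what is proved, stated in full; the proofs are below) =====
def Claim_equal_get_timekey_slots : Prop := ∀ (key_delay : Int) (FPS : Int), Dom_get_timekey_slots key_delay FPS → Pre_get_timekey_slots key_delay FPS → Spec_get_timekey_slots key_delay FPS (get_timekey_slots key_delay FPS)

-- ===== LEMMAS AND PROOFS =====

-- A's loop body depends only on the iteration count, not the range element.
def pvLoop (kd ts : Int) : Nat → Int × Int → Int × Int
  | 0, s => s
  | n+1, s => pvLoop kd ts n (if s.1 < kd then (s.1 + ts, s.2 + 1) else s)

theorem pvFoldl_eq_pvLoop (kd ts : Int) (l : List Int) (s : Int × Int) :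
    l.foldl (fun (st : Int × Int) _ =>
      if st.1 < kd then (st.1 + ts, st.2 + 1) else st) s = pvLoop kd ts l.length s := by
  induction l generalizing s with
  | nil => rfl
  | cons x xs ih => simp [List.foldl, pvLoop, ih]

theorem pvLoop_nonpos (kd ts : Int) (hts : ts ≤ 0) :
    ∀ (n : Nat) (tc sc : Int),
      (pvLoop kd ts n (tc, sc)).2 = if tc < kd then sc + n else sc := by
  intro n
  induction n with
  | zero => intro tc sc; simp [pvLoop]
  | succ n ih =>
    intro tc sc
    by_cases h : tc < kd
    · have h' : tc + ts < kd := by omega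
      simp [pvLoop, h, ih, h']
      omega
    · simp [pvLoop, h, ih]

theorem pvFloordiv_add_self (a ts : Int) (h : 0 < ts) :
    PySem.Int.floordiv (a + ts) ts = PySem.Int.floordiv a ts + 1 := by
  obtain ⟨l, u⟩ := (PySem.Int.floordiv_eq_iff_of_pos h (a := a)).mp rfl
  refine (PySem.Int.floordiv_eq_iff_of_pos h).mpr ⟨?_, ?_⟩ <;> nlinarith

theorem pvLoop_pos (kd ts : Int) (hts : 0 < ts) :
    ∀ (n : Nat) (tc sc : Int),
      (pvLoop kd ts n (tc, sc)).2
        = sc + min (n : Int) (max 0 (-(PySem.Int.floordiv (tc - kd) ts))) := by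
  intro n
  induction n with
  | zero => intro tc sc; simp [pvLoop]
  | succ n ih =>
    intro tc sc
    obtain ⟨l, u⟩ := (PySem.Int.floordiv_eq_iff_of_pos hts (a := tc - kd)).mp rfl
    by_cases h : tc < kd
    · have hq : PySem.Int.floordiv (tc - kd) ts < 0 := by nlinarith
      have hstep : PySem.Int.floordiv (tc + ts - kd) ts
          = PySem.Int.floordiv (tc - kd) ts + 1 := by
        have := pvFloordiv_add_self (tc - kd) ts hts
        rw [show tc + ts - kd = tc - kd + ts by ring, this]
      simp [pvLoop, h, ih, hstep]
      omega
    · have hq : 0 ≤ PySem.Int.floordiv (tc - kd) ts := by nlinarith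
      simp [pvLoop, h, ih]
      omega

-- ===== VERDICT (by name: the statement is the Claim_ definition above) =====
theorem get_timekey_slots_spec : Claim_equal_get_timekey_slots := by
  intro kd FPS _ _
  unfold Spec_get_timekey_slots get_timekey_slots get_timekey_slots_alt
  dsimp only
  have hlen : (PySem.List.pyRange 0 1000 1).length = 1000 := by
    simp [PySem.List.length_pyRange_one]
  rw [pvFoldl_eq_pvLoop, hlen]
  set ts := PySem.Int.floordiv 1000 FPS with hts
  by_cases h : ts ≤ 0
  · rw [pvLoop_nonpos kd ts h]
    simp only [h, if_true]
    split_ifs <;> simp_all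
  · replace h : 0 < ts := by omega
    rw [pvLoop_pos kd ts h]
    have : ¬ ts ≤ 0 := by omega
    simp only [this, if_false]
    rw [show (0 : Int) - kd = -kd by ring]
    omega
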